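-- pv_equiv track=rewrite | github.com/tiberiu-popa/steam-roll | hackerrank/interview_kit/riddle.py | longest_min_runs
-- ===== SOURCE A (Python) =====
-- def longest_min_runs(arr):
--     st = []
--     runs = len(arr) * [None]
--     for i, x in enumerate(arr):
--         while st and st[-1][1] > x:
--             pos, y = st.pop()
--             runs[pos] = i - pos
--         if not st or x >= st[-1][1]:
--             st.append((i, x))
--     while st:
--         pos, y = st.pop()
--         runs[pos] = len(arr) - pos
--     return runs
-- ===== SOURCE B (Python) =====
-- def longest_min_runs(arr):
--     # right-to-left next-strictly-smaller scan: stack holds (distance_from_right_end, value)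
--     # with values strictly decreasing downward; run[i] = d - d' where d' is the distance of
--     # the nearest smaller element to the right, or d (= n - i) if none exists.
--     res = []
--     stack = []
--     d = 0
--     for x in reversed(arr):
--         d += 1
--         while stack and stack[-1][1] >= x:
--             stack.pop()
--         res.append(d - stack[-1][0] if stack else d)
--         stack.append((d, x))
--     res.reverse()
--     return res
-- ===== Notes on version B (the rewrite author's own statement) =====
-- stated objective: alternative
-- what changed: Replaces A's forward monotonic-stack pass (which writes each run length at the moment its element is popped, plus a final drain loop for survivors) by a right-to-left next-strictly-smaller-element scan that emits each element's run length immediately as it is visited, with no placeholder array and no drain phase.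
import Mathlib
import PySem

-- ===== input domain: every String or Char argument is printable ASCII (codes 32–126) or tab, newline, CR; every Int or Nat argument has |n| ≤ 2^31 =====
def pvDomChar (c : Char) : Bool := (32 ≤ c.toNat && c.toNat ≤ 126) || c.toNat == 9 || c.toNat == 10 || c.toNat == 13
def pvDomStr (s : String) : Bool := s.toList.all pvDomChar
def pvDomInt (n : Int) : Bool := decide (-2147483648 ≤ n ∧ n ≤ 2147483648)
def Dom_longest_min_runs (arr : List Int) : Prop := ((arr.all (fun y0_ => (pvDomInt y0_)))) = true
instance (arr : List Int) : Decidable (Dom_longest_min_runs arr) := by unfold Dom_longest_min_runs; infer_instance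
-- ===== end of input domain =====

-- B replaces A's forward pass (write runs at pop time + final drain) by a right-to-left
-- next-strictly-smaller scan emitting each run as its element is visited; objective: alternative decomposition.

-- ===== PORT A =====
-- the `while st and st[-1][1] > x` pop loop; writes i - pos at each pop (stack top at head)
def aPop (i : Nat) (x : Int) : List (Nat × Int) → List Int → (List (Nat × Int) × List Int)
  | [], runs => ([], runs)
  | (pos, y) :: st, runs =>
      if x < y then aPop i x st (runs.set pos ((i : Int) - (pos : Int)))
      else ((pos, y) :: st, runs)

-- the `for i, x in enumerate(arr)` loop, state (st, runs)
def aMain : List Int → Nat → List (Nat × Int) → List Int → (List (Nat × Int) × List Int)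
  | [], _, st, runs => (st, runs)
  | x :: rest, i, st, runs =>
      let p := aPop i x st runs
      let st'' := match p.1 with
        | [] => [(i, x)]                                        -- `if not st`
        | (q, y) :: s => if y ≤ x then (i, x) :: (q, y) :: s    -- `or x >= st[-1][1]`
                         else (q, y) :: s
      aMain rest (i + 1) st'' p.2

-- the final `while st` drain, writing len(arr) - pos
def aDrain (n : Nat) : List (Nat × Int) → List Int → List Int
  | [], runs => runs
  | (pos, _) :: st, runs => aDrain n st (runs.set pos ((n : Int) - (pos : Int)))

-- `runs = len(arr) * [None]`: ported with placeholder 0; every slot is overwritten before return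
def longest_min_runs (arr : List Int) : List Int :=
  let p := aMain arr 0 [] (List.replicate arr.length 0)
  aDrain arr.length p.1 p.2

-- ===== PORT B =====
-- the `while stack and stack[-1][1] >= x` pop loop of Source B
def bPop (x : Int) : List (Nat × Int) → List (Nat × Int)
  | [] => []
  | (d', y) :: st => if x ≤ y then bPop x st else (d', y) :: st

-- the `for x in reversed(arr)` loop of Source B; acc is built head-first, which is the final
-- (already reversed) order, porting `res.append` + `res.reverse()`
def bLoop : List Int → Nat → List (Nat × Int) → List Int → (List (Nat × Int) × List Int)
  | [], _, st, acc => (st, acc)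
  | x :: rest, d, st, acc =>
      let st' := bPop x st
      let r : Int := match st' with
        | [] => ((d : Int) + 1)
        | (d', _) :: _ => ((d : Int) + 1) - (d' : Int)
      bLoop rest (d + 1) ((d + 1, x) :: st') (r :: acc)

def longest_min_runs_alt (arr : List Int) : List Int :=
  (bLoop arr.reverse 0 [] []).2

-- ===== PRECONDITION & SPEC =====
def Spec_longest_min_runs (arr : List Int) (out : List Int) : Prop := out = longest_min_runs_alt arr
instance (arr : List Int) (out : List Int) : Decidable (Spec_longest_min_runs arr out) := by unfold Spec_longest_min_runs; infer_instance

-- ===== CLAIM (what is proved, stated in full; the proofs are below) =====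
def Claim_equal_longest_min_runs : Prop := ∀ (arr : List Int), Dom_longest_min_runs arr → Spec_longest_min_runs arr (longest_min_runs arr)

-- ===== LEMMAS AND PROOFS =====

-- number of leading elements of l that are ≥ x (the run length minus one)
def countGe (x : Int) : List Int → Nat
  | [] => 0
  | y :: t => if y < x then 0 else countGe x t + 1

theorem countGe_eq_length (x : Int) (l : List Int) (h : ∀ z ∈ l, x ≤ z) :
    countGe x l = l.length := by
  induction l with
  | nil => rfl
  | cons y t ih =>
    have hy : x ≤ y := h y (by simp)
    simp only [countGe, List.length_cons, if_neg (not_lt.mpr hy)]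
    rw [ih (fun z hz => h z (by simp [hz]))]

-- ---------- B side ----------

theorem bPop_bPop (x y : Int) (hxy : x ≤ y) (st : List (Nat × Int)) :
    bPop x (bPop y st) = bPop x st := by
  induction st with
  | nil => rfl
  | cons a t ih =>
    obtain ⟨d, v⟩ := a
    by_cases hv : y ≤ v
    · rw [bPop, if_pos hv, ih, bPop, if_pos (le_trans hxy hv)]
    · rw [bPop, if_neg hv]

-- the stack after Source B has processed a list right-to-left (top at head)
def stairs : List Int → List (Nat × Int)
  | [] => []
  | y :: t => (t.length + 1, y) :: bPop y (stairs t)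

theorem bLoop_append (l₁ l₂ : List Int) (d : Nat) (st : List (Nat × Int)) (acc : List Int) :
    bLoop (l₁ ++ l₂) d st acc =
      bLoop l₂ (d + l₁.length) (bLoop l₁ d st acc).1 (bLoop l₁ d st acc).2 := by
  induction l₁ generalizing d st acc with
  | nil => simp [bLoop]
  | cons x t ih =>
    simp only [List.cons_append, bLoop, List.length_cons]
    rw [ih]
    ring_nf

theorem bLoop_run (t : List Int) :
    bLoop t.reverse 0 [] [] = (stairs t, longest_min_runs_alt t) := by
  induction t with
  | nil => rfl
  | cons x t ih =>
    have hrev : (x :: t).reverse = t.reverse ++ [x] := by simp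
    rw [hrev, bLoop_append, ih]
    simp only [bLoop, List.length_reverse, Nat.zero_add, stairs, longest_min_runs_alt]
    rw [hrev, bLoop_append, ih]
    simp [bLoop]

-- popping the stairs stack with x locates the first element of t smaller than x
theorem stairs_pop (x : Int) (t : List Int) :
    (bPop x (stairs t) = [] ∧ countGe x t = t.length) ∨
    (∃ y rest, bPop x (stairs t) = (t.length - countGe x t, y) :: rest ∧ countGe x t < t.length) := by
  induction t with
  | nil => left; exact ⟨rfl, rfl⟩
  | cons z t ih =>
    by_cases hz : z < x
    · right
      refine ⟨z, bPop z (stairs t), ?_, ?_⟩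
      · simp [stairs, bPop, countGe, if_pos hz, not_le.mpr hz]
      · simp [countGe, if_pos hz]
    · have hxz : x ≤ z := not_lt.mp hz
      have hstep : bPop x (stairs (z :: t)) = bPop x (stairs t) := by
        simp only [stairs, bPop, if_pos hxz]
        exact bPop_bPop x z hxz (stairs t)
      rcases ih with ⟨h1, h2⟩ | ⟨y, rest, h1, h2⟩
      · left
        constructor
        · rw [hstep, h1]
        · simp [countGe, if_neg hz, h2]
      · right
        refine ⟨y, rest, ?_, ?_⟩
        · rw [hstep, h1]
          have hc : countGe x (z :: t) = countGe x t + 1 := by simp [countGe, if_neg hz]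
          have hlen : (z :: t).length - countGe x (z :: t) = t.length - countGe x t := by
            rw [hc]; simp
          rw [hlen]
        · have hc : countGe x (z :: t) = countGe x t + 1 := by simp [countGe, if_neg hz]
          rw [hc]; simp only [List.length_cons]; omega

theorem alt_cons (x : Int) (t : List Int) :
    longest_min_runs_alt (x :: t) = ((countGe x t : Int) + 1) :: longest_min_runs_alt t := by
  have hrev : (x :: t).reverse = t.reverse ++ [x] := by simp
  unfold longest_min_runs_alt
  rw [hrev, bLoop_append, bLoop_run]
  simp only [bLoop, List.length_reverse, Nat.zero_add]
  rcases stairs_pop x t with ⟨h1, h2⟩ | ⟨y, rest, h1, h2⟩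
  · rw [h1, h2]
  · rw [h1]
    have h3 : ((t.length : Int) + 1) - ((t.length - countGe x t : Nat) : Int)
        = (countGe x t : Int) + 1 := by
      rw [Nat.cast_sub (le_of_lt h2)]; ring
    dsimp only
    rw [h3]


-- ---------- A side ----------

-- index shift on stack entries
def shf (pr : Nat × Int) : Nat × Int := (pr.1 + 1, pr.2)

theorem aPop_mem (i : Nat) (x : Int) (st : List (Nat × Int)) (runs : List Int) :
    ∀ pr ∈ (aPop i x st runs).1, pr ∈ st := by
  induction st generalizing runs with
  | nil => simp [aPop]
  | cons a t ih =>
    obtain ⟨p, y⟩ := a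
    intro pr hpr
    by_cases hxy : x < y
    · rw [aPop, if_pos hxy] at hpr
      exact List.mem_cons_of_mem _ (ih _ pr hpr)
    · rw [aPop, if_neg hxy] at hpr
      exact hpr

theorem aPop_head (i : Nat) (x : Int) (st : List (Nat × Int)) (runs : List Int)
    (q : Nat) (y : Int) (rest : List (Nat × Int))
    (h : (aPop i x st runs).1 = (q, y) :: rest) : y ≤ x := by
  induction st generalizing runs with
  | nil => simp [aPop] at h
  | cons a t ih =>
    obtain ⟨p, z⟩ := a
    by_cases hxz : x < z
    · rw [aPop, if_pos hxz] at h
      exact ih _ h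
    · rw [aPop, if_neg hxz] at h
      cases h
      exact not_lt.mp hxz

-- the pop loop, shifted by one position, with the sentinel (0, s) at the bottom
theorem aPop_shift (i : Nat) (x s : Int) (st : List (Nat × Int)) (runs : List Int) (v0 : Int) :
    aPop (i + 1) x (st.map shf ++ [(0, s)]) (v0 :: runs) =
      if (aPop i x st runs).1 = [] then
        (if x < s then ([], ((i : Int) + 1) :: (aPop i x st runs).2)
         else ([(0, s)], v0 :: (aPop i x st runs).2))
      else ((aPop i x st runs).1.map shf ++ [(0, s)], v0 :: (aPop i x st runs).2) := by
  induction st generalizing runs with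
  | nil =>
    simp only [List.map_nil, List.nil_append, aPop]
    by_cases hxs : x < s
    · simp [if_pos hxs]
    · simp [if_neg hxs]
  | cons a t ih =>
    obtain ⟨p, y⟩ := a
    by_cases hxy : x < y
    · simp only [List.map_cons, List.cons_append, shf, aPop, if_pos hxy]
      have hset : (v0 :: runs).set (p + 1) (((i + 1 : Nat) : Int) - ((p + 1 : Nat) : Int))
          = v0 :: runs.set p ((i : Int) - (p : Int)) := by
        simp only [List.set]
        congr 1
        push_cast
        ring
      rw [hset]
      exact ih _
    · simp [aPop, if_neg hxy, shf]

theorem aPop_shift_nosent (i : Nat) (x : Int) (st : List (Nat × Int)) (runs : List Int) (v0 : Int) :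
    aPop (i + 1) x (st.map shf) (v0 :: runs) =
      ((aPop i x st runs).1.map shf, v0 :: (aPop i x st runs).2) := by
  induction st generalizing runs with
  | nil => simp [aPop]
  | cons a t ih =>
    obtain ⟨p, y⟩ := a
    by_cases hxy : x < y
    · simp only [List.map_cons, shf, aPop, if_pos hxy]
      have hset : (v0 :: runs).set (p + 1) (((i + 1 : Nat) : Int) - ((p + 1 : Nat) : Int))
          = v0 :: runs.set p ((i : Int) - (p : Int)) := by
        simp only [List.set]
        congr 1
        push_cast
        ring
      rw [hset]
      exact ih _
    · simp [aPop, if_neg hxy, shf]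

-- the main loop, shifted, without sentinel
theorem aMain_shift_nosent (l : List Int) (i : Nat) (st : List (Nat × Int)) (runs : List Int) (v0 : Int) :
    aMain l (i + 1) (st.map shf) (v0 :: runs) =
      ((aMain l i st runs).1.map shf, v0 :: (aMain l i st runs).2) := by
  induction l generalizing i st runs with
  | nil => rfl
  | cons z rest ih =>
    simp only [aMain, aPop_shift_nosent]
    rcases hst : (aPop i z st runs).1 with _ | ⟨⟨q, y⟩, s⟩
    · simpa [hst] using ih (i + 1) [(i, z)] (aPop i z st runs).2
    · simp only [List.map_cons, shf]
      by_cases hyz : y ≤ z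
      · simpa [if_pos hyz] using ih (i + 1) ((i, z) :: (q, y) :: s) (aPop i z st runs).2
      · simpa [if_neg hyz] using ih (i + 1) ((q, y) :: s) (aPop i z st runs).2

-- the main loop with sentinel (0, s): either s stays the running minimum throughout l
-- (sentinel survives, slot 0 untouched), or the sentinel is popped at the first element < s,
-- recording i + 1 + countGe s l in slot 0
theorem aMain_shift (l : List Int) (i : Nat) (st : List (Nat × Int)) (runs : List Int)
    (v0 s : Int) (hst : ∀ pr ∈ st, s ≤ pr.2) :
    aMain l (i + 1) (st.map shf ++ [(0, s)]) (v0 :: runs) =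
      if ∀ z ∈ l, s ≤ z then
        ((aMain l i st runs).1.map shf ++ [(0, s)], v0 :: (aMain l i st runs).2)
      else
        ((aMain l i st runs).1.map shf,
          ((i : Int) + 1 + (countGe s l : Int)) :: (aMain l i st runs).2) := by
  induction l generalizing i st runs v0 with
  | nil => simp [aMain]
  | cons z rest ih =>
    simp only [aMain, aPop_shift]
    by_cases hp : (aPop i z st runs).1 = []
    · -- the old stack fully popped; the sentinel is reached
      rw [hp]
      simp only [reduceIte]
      by_cases hzs : z < s
      · -- sentinel popped now: first smaller element is z
        rw [if_pos hzs]
        dsimp only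
        have hnot : ¬ ∀ w ∈ z :: rest, s ≤ w := by
          intro h; exact absurd (h z (by simp)) (not_le.mpr hzs)
        rw [if_neg hnot]
        have hns := aMain_shift_nosent rest (i + 1) [(i, z)] (aPop i z st runs).2 ((i : Int) + 1)
        simp only [List.map_cons, List.map_nil, shf] at hns
        rw [hns]
        have hc : countGe s (z :: rest) = 0 := by simp [countGe, if_pos hzs]
        rw [hc]
        norm_num
      · -- sentinel kept; push z on it
        have hsz : s ≤ z := not_lt.mp hzs
        rw [if_neg hzs]
        dsimp only
        rw [if_pos hsz]
        have hrec := ih (i + 1) [(i, z)] (aPop i z st runs).2 v0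
          (by intro pr hpr; simp at hpr; rw [hpr]; exact hsz)
        simp only [List.map_cons, List.map_nil, List.cons_append, List.nil_append, shf] at hrec
        rw [hrec]
        by_cases hall : ∀ w ∈ rest, s ≤ w
        · rw [if_pos hall, if_pos (by intro w hw; rcases List.mem_cons.mp hw with rfl | hw; exacts [hsz, hall _ hw])]
        · rw [if_neg hall, if_neg (by intro h; exact hall (fun w hw => h w (by simp [hw])))]
          have hc : countGe s (z :: rest) = countGe s rest + 1 := by
            simp [countGe, if_neg (not_lt.mpr hsz)]
          rw [hc]
          have hv : ((i + 1 : Nat) : Int) + 1 + (countGe s rest : Int)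
              = (i : Int) + 1 + ((countGe s rest + 1 : Nat) : Int) := by push_cast; ring
          rw [hv]
    · -- old stack not exhausted: top y of the popped stack satisfies y ≤ z, and s ≤ y
      rw [if_neg hp]
      obtain ⟨⟨q, y⟩, t, hp'⟩ : ∃ a t, (aPop i z st runs).1 = a :: t := by
        rcases h' : (aPop i z st runs).1 with _ | ⟨a, t⟩
        · exact absurd h' hp
        · exact ⟨a, t, rfl⟩
      have hyz : y ≤ z := aPop_head i z st runs q y t hp'
      have hsy : s ≤ y := hst (q, y) (aPop_mem i z st runs (q, y) (by rw [hp']; simp))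
      have hsz : s ≤ z := le_trans hsy hyz
      rw [hp']
      simp only [List.map_cons, List.cons_append, shf]
      simp only [if_pos hyz]
      have hmem : ∀ pr ∈ ((i, z) :: (q, y) :: t : List (Nat × Int)), s ≤ pr.2 := by
        intro pr hpr
        rcases List.mem_cons.mp hpr with rfl | hpr
        · exact hsz
        · exact hst pr (aPop_mem i z st runs pr (by rw [hp']; exact hpr))
      have hrec := ih (i + 1) ((i, z) :: (q, y) :: t) (aPop i z st runs).2 v0 hmem
      simp only [List.map_cons, List.cons_append, shf] at hrec
      rw [hrec]
      by_cases hall : ∀ w ∈ rest, s ≤ w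
      · rw [if_pos hall, if_pos (by intro w hw; rcases List.mem_cons.mp hw with rfl | hw; exacts [hsz, hall _ hw])]
      · rw [if_neg hall, if_neg (by intro h; exact hall (fun w hw => h w (by simp [hw])))]
        have hc : countGe s (z :: rest) = countGe s rest + 1 := by
          simp [countGe, if_neg (not_lt.mpr hsz)]
        rw [hc]
        have hv : ((i + 1 : Nat) : Int) + 1 + (countGe s rest : Int)
            = (i : Int) + 1 + ((countGe s rest + 1 : Nat) : Int) := by push_cast; ring
        rw [hv]

theorem aDrain_shift_nosent (n : Nat) (st : List (Nat × Int)) (runs : List Int) (v0 : Int) :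
    aDrain (n + 1) (st.map shf) (v0 :: runs) = v0 :: aDrain n st runs := by
  induction st generalizing runs with
  | nil => rfl
  | cons a t ih =>
    obtain ⟨p, y⟩ := a
    simp only [List.map_cons, shf, aDrain]
    have hset : (v0 :: runs).set (p + 1) (((n + 1 : Nat) : Int) - ((p + 1 : Nat) : Int))
        = v0 :: runs.set p ((n : Int) - (p : Int)) := by
      simp only [List.set]; congr 1; push_cast; ring
    rw [hset, ih]

theorem aDrain_shift_sent (n : Nat) (st : List (Nat × Int)) (runs : List Int) (v0 : Int) :
    aDrain (n + 1) (st.map shf ++ [(0, s)]) (v0 :: runs)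
      = ((n : Int) + 1) :: aDrain n st runs := by
  induction st generalizing runs with
  | nil => simp [aDrain]
  | cons a t ih =>
    obtain ⟨p, y⟩ := a
    simp only [List.map_cons, List.cons_append, shf, aDrain]
    have hset : (v0 :: runs).set (p + 1) (((n + 1 : Nat) : Int) - ((p + 1 : Nat) : Int))
        = v0 :: runs.set p ((n : Int) - (p : Int)) := by
      simp only [List.set]; congr 1; push_cast; ring
    rw [hset, ih]

theorem a_cons (x : Int) (t : List Int) :
    longest_min_runs (x :: t) = ((countGe x t : Int) + 1) :: longest_min_runs t := by
  unfold longest_min_runs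
  simp only [List.length_cons, List.replicate, aMain, aPop]
  have h0 : aMain t (0 + 1) (([] : List (Nat × Int)).map shf ++ [(0, x)])
      ((0 : Int) :: List.replicate t.length 0)
      = if ∀ z ∈ t, x ≤ z then
          ((aMain t 0 [] (List.replicate t.length 0)).1.map shf ++ [(0, x)],
            (0 : Int) :: (aMain t 0 [] (List.replicate t.length 0)).2)
        else
          ((aMain t 0 [] (List.replicate t.length 0)).1.map shf,
            ((0 : Int) + 1 + (countGe x t : Int)) :: (aMain t 0 [] (List.replicate t.length 0)).2) :=
    aMain_shift t 0 [] (List.replicate t.length 0) 0 x (by simp)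
  simp only [List.map_nil, List.nil_append] at h0
  rw [h0]
  by_cases hall : ∀ z ∈ t, x ≤ z
  · rw [if_pos hall]
    simp only [aDrain_shift_sent]
    rw [countGe_eq_length x t hall]
  · rw [if_neg hall]
    simp only [aDrain_shift_nosent]
    congr 1
    ring

-- ===== VERDICT (by name: the statement is the Claim_ definition above) =====
theorem runs_eq (arr : List Int) : longest_min_runs arr = longest_min_runs_alt arr := by
  induction arr with
  | nil => rfl
  | cons x t ih => rw [a_cons, alt_cons, ih]

theorem longest_min_runs_spec : Claim_equal_longest_min_runs :=
  fun arr _ => runs_eq arr
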